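-- pv_equiv track=rewrite | github.com/russellnibbelink/cycsv | y.py | cumu_by_year
-- ===== SOURCE A (Python) =====
-- def cumu_by_year(list_by_month):
--     ylist = []
--     i = 0
--     total = 0
--     for elem in list_by_month:
--         total += elem
--         i += 1
--         if i % 12 == 0:
--             ylist.append(total)
--             total = 0
--     return ylist
-- ===== SOURCE B (Python) =====
-- def cumu_by_year(list_by_month):
--     ylist = []
--     for j in range(0, len(list_by_month) - 11, 12):
--         ylist.append(sum(list_by_month[j:j+12]))
--     return ylist
-- ===== Notes on version B (the rewrite author's own statement) =====
-- stated objective: simpler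
-- what changed: Replaces the flat element-by-element accumulator with a running counter and modulo test by an outer loop over 12-aligned chunk start indices that sums each full slice with the builtin sum (the range bound len-11 drops any trailing partial chunk, as A does).
import Mathlib
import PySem

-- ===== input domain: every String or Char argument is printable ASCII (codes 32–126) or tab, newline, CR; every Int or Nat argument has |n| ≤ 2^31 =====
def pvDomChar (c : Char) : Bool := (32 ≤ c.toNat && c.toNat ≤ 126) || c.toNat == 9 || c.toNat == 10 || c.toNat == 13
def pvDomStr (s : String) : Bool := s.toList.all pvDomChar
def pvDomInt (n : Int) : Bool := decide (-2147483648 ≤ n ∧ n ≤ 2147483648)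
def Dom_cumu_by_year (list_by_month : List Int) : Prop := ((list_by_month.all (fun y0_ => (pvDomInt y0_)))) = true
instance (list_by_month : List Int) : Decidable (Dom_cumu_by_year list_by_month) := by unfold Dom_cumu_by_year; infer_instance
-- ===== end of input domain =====

-- B replaces A's flat accumulator-with-counter loop by a loop over 12-aligned chunk
-- start indices summing each full slice (simpler decomposition; same O(n) cost).


-- ===== PORT A =====
-- one loop step of A's for-loop: total += elem; i += 1; if i % 12 == 0: append, reset
def cumuStepA (st : List Int × Int × Int) (elem : Int) : List Int × Int × Int :=
  let total := st.2.2 + elem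
  let i := st.2.1 + 1
  if PySem.Int.mod i 12 = 0 then (st.1 ++ [total], i, 0) else (st.1, i, total)

def cumu_by_year (list_by_month : List Int) : List Int :=
  (list_by_month.foldl cumuStepA ([], 0, 0)).1

-- ===== PORT B =====
def cumu_by_year_alt (list_by_month : List Int) : List Int :=
  (PySem.List.pyRange 0 ((list_by_month.length : Int) - 11) 12).foldl
    (fun ylist j =>
      ylist ++ [(PySem.List.slice list_by_month (some j) (some (j + 12))).sum]) []

-- ===== PRECONDITION & SPEC =====
def Spec_cumu_by_year (list_by_month : List Int) (out : List Int) : Prop := out = cumu_by_year_alt list_by_month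
instance (list_by_month : List Int) (out : List Int) : Decidable (Spec_cumu_by_year list_by_month out) := by unfold Spec_cumu_by_year; infer_instance

-- ===== CLAIM (what is proved, stated in full; the proofs are below) =====
def Claim_equal_cumu_by_year : Prop := ∀ (list_by_month : List Int), Dom_cumu_by_year list_by_month → Spec_cumu_by_year list_by_month (cumu_by_year list_by_month)

-- ===== LEMMAS AND PROOFS =====

-- common reference shape: the sums of the successive full 12-element chunks
def chunkSums (l : List Int) : List Int :=
  if _h : l.length < 12 then [] else (l.take 12).sum :: chunkSums (l.drop 12)
termination_by l.length
decreasing_by simp; omega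

theorem chunkSums_small {l : List Int} (h : l.length < 12) : chunkSums l = [] := by
  rw [chunkSums]; simp [h]

theorem chunkSums_big {l : List Int} (h : ¬ l.length < 12) :
    chunkSums l = (l.take 12).sum :: chunkSums (l.drop 12) := by
  rw [chunkSums]; simp [h]

-- A's loop, advanced a whole chunk (j elements) at a time
theorem runA (j : Nat) (hj1 : 1 ≤ j) (hj : j ≤ 12) :
    ∀ (l acc : List Int) (i total : Int), 0 ≤ i → PySem.Int.mod i 12 = 12 - j →
      (l.foldl cumuStepA (acc, i, total)).1 =
        if l.length < j then acc
        else ((l.drop j).foldl cumuStepA (acc ++ [total + (l.take j).sum], i + j, 0)).1 := by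
  induction j with
  | zero => omega
  | succ j ih =>
    intro l acc i total hi hm
    cases l with
    | nil => simp
    | cons e rest =>
      have hme : i % 12 = 12 - (j + 1 : Nat) := by
        rw [← PySem.Int.mod_eq_emod_of_pos (a := i) (b := 12) (by omega)]; exact hm
      by_cases hj0 : j = 0
      · subst hj0
        have hc : PySem.Int.mod (i + 1) 12 = 0 := by
          rw [PySem.Int.mod_eq_emod_of_pos (by omega)]; omega
        have hstep : cumuStepA (acc, i, total) e = (acc ++ [total + e], i + 1, 0) := by
          simp only [cumuStepA]
          rw [if_pos hc]
        simp only [List.foldl_cons, hstep]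
        simp
      · have hc : ¬ PySem.Int.mod (i + 1) 12 = 0 := by
          rw [PySem.Int.mod_eq_emod_of_pos (by omega)]; omega
        have hstep : cumuStepA (acc, i, total) e = (acc, i + 1, total + e) := by
          simp only [cumuStepA]
          rw [if_neg hc]
        simp only [List.foldl_cons, hstep]
        have hmod' : PySem.Int.mod (i + 1) 12 = 12 - j := by
          rw [PySem.Int.mod_eq_emod_of_pos (by omega)]; omega
        rw [ih (by omega) (by omega) rest acc (i + 1) (total + e) (by omega) hmod']
        have hlen2 : ¬ (e :: rest).length < j + 1 ↔ ¬ rest.length < j := by simp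
        by_cases hl : rest.length < j
        · simp [hl]
        · have hl2 : ¬ (e :: rest).length < j + 1 := hlen2.mpr hl
          rw [if_neg hl, if_neg hl2]
          have htake : ((e :: rest).take (j + 1)).sum = e + (rest.take j).sum := by
            simp [List.take_succ_cons]
          have hdrop : (e :: rest).drop (j + 1) = rest.drop j := by simp
          rw [htake, hdrop,
              show total + (e + (rest.take j).sum) = total + e + (rest.take j).sum by ring,
              show i + ((j + 1 : Nat) : Int) = i + 1 + (j : Int) by push_cast; ring]

-- A's loop from a chunk boundary produces acc ++ chunkSums
theorem foldA_chunk : ∀ (n : Nat) (l acc : List Int) (i : Int), l.length = n → 0 ≤ i →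
    PySem.Int.mod i 12 = 0 →
    (l.foldl cumuStepA (acc, i, 0)).1 = acc ++ chunkSums l := by
  intro n
  induction n using Nat.strong_induction_on with
  | _ n ih =>
    intro l acc i hn hi hm
    rw [runA 12 (by omega) (by omega) l acc i 0 hi (by rw [hm]; norm_num)]
    by_cases hl : l.length < 12
    · simp [hl, chunkSums_small hl]
    · rw [if_neg hl]
      have hm' : PySem.Int.mod (i + 12) 12 = 0 := by
        rw [PySem.Int.mod_eq_emod_of_pos (by omega)] at hm ⊢
        omega
      rw [show ((12 : Nat) : Int) = 12 by norm_num]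
      rw [ih (l.drop 12).length (by simp; omega) (l.drop 12) _ (i + 12) rfl (by omega) hm']
      rw [chunkSums_big hl]
      simp

-- foldl-append is map
theorem foldl_append_map {α β : Type} (g : α → β) :
    ∀ (xs : List α) (init : List β),
      xs.foldl (fun a j => a ++ [g j]) init = init ++ xs.map g := by
  intro xs
  induction xs with
  | nil => simp
  | cons x xs ih => intro init; simp [ih]

-- B's range of chunk starts has exactly length/12 entries
theorem count_eq (n : Nat) :
    (if (0:Int) < (n:Int) - 11 - 0 then ((((n:Int) - 11) - 0 + 12 - 1) / 12).toNat else 0) = n / 12 := by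
  split_ifs with h <;> omega

-- B computes the map form over chunk indices
theorem B_map_form (l : List Int) :
    cumu_by_year_alt l = (List.range (l.length / 12)).map
      (fun k => ((l.drop (12 * k)).take 12).sum) := by
  unfold cumu_by_year_alt
  rw [PySem.List.pyRange_of_pos 0 ((l.length : Int) - 11) (by omega)]
  rw [foldl_append_map]
  simp only [List.nil_append, List.map_map]
  rw [show (if (0:Int) < (l.length:Int) - 11 then ((((l.length:Int)) - 11 - 0 + 12 - 1) / 12).toNat else 0) = l.length / 12 by
        have := count_eq l.length; split_ifs at this ⊢ <;> omega]
  apply List.map_congr_left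
  intro k _
  simp only [Function.comp]
  have hcast : (0 : Int) + 12 * (k : Int) = ((12 * k : Nat) : Int) := by push_cast; ring
  have hcast2 : ((12 * k : Nat) : Int) + 12 = ((12 * k : Nat) : Int) + ((12 : Nat) : Int) := by norm_num
  rw [hcast, hcast2, PySem.List.slice_natCast_add]

-- the map form is chunkSums
theorem map_form_chunk : ∀ (n : Nat) (l : List Int), l.length = n →
    (List.range (l.length / 12)).map (fun k => ((l.drop (12 * k)).take 12).sum) = chunkSums l := by
  intro n
  induction n using Nat.strong_induction_on with
  | _ n ih =>
    intro l hn
    by_cases hl : l.length < 12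
    · have : l.length / 12 = 0 := by omega
      rw [this, chunkSums_small hl]; simp
    · have hdl : (l.drop 12).length = l.length - 12 := by simp
      have hsplit : l.length / 12 = (l.drop 12).length / 12 + 1 := by
        rw [hdl]; omega
      rw [hsplit, List.range_succ_eq_map, chunkSums_big hl]
      simp only [List.map_cons, List.map_map, Nat.mul_zero, List.drop_zero]
      congr 1
      rw [← ih (l.drop 12).length (by simp; omega) (l.drop 12) rfl]
      apply List.map_congr_left
      intro k _
      simp only [Function.comp]
      rw [List.drop_drop, show 12 * k.succ = 12 + 12 * k by omega]

-- ===== VERDICT (by name: the statement is the Claim_ definition above) =====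
theorem cumu_by_year_spec : Claim_equal_cumu_by_year := by
  intro l _
  unfold Spec_cumu_by_year cumu_by_year
  rw [foldA_chunk l.length l [] 0 rfl (by omega) (by decide)]
  rw [B_map_form, map_form_chunk l.length l rfl]
  simp
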